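-- pv_equiv track=rewrite | github.com/ArnavTomar18/Sentiment-Intelligence-Engine | src/models/train_ott.py | ott_sentiment
-- ===== SOURCE A (Python) =====
-- def ott_sentiment(text):
--     text = str(text).lower()
--     pos = ["brilliant","stunning","masterpiece","outstanding",
--            "amazing","gripping","powerful","emotional"]
--     neg = ["boring","disappointing","weak","poor",
--            "terrible","awful","bad","slow"]
--     p = sum(1 for w in pos if w in text)
--     n = sum(1 for w in neg if w in text)
--     return 1 if p >= n else 0
-- ===== SOURCE B (Python) =====
-- POS = frozenset(["brilliant", "stunning", "masterpiece", "outstanding",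
--                  "amazing", "gripping", "powerful", "emotional"])
-- NEG = frozenset(["boring", "disappointing", "weak", "poor",
--                  "terrible", "awful", "bad", "slow"])
--
-- def ott_sentiment(text):
--     t = str(text).lower()
--     hits = set()
--     for i in range(len(t)):
--         for w in POS:
--             if t.startswith(w, i):
--                 hits.add(w)
--         for w in NEG:
--             if t.startswith(w, i):
--                 hits.add(w)
--     p = len(hits & POS)
--     return 1 if 2 * p >= len(hits) else 0
-- ===== Notes on version B (the rewrite author's own statement) =====
-- stated objective: alternative
-- what changed: Instead of asking per keyword whether it occurs in the text, B makes one pass over the text positions, collecting into a set every keyword that starts at the current position, and then compares 2*|matched positive keywords| with |all matched keywords| (p >= n iff 2p >= p+n).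
import Mathlib
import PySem

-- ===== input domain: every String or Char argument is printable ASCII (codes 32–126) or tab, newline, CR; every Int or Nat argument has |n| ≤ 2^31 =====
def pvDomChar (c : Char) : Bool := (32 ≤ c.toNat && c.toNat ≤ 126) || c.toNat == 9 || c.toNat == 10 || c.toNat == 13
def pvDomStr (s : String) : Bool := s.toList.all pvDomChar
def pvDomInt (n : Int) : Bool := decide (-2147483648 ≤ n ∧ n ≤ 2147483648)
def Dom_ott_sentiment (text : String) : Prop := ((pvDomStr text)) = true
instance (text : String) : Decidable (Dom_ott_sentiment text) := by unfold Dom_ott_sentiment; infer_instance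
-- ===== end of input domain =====

-- B scans the text position by position, collecting the set of keywords that start at each
-- position, and decides by 2*|positive hits| >= |all hits| (alternative algorithm, same cost class).


-- ===== PORT A =====
def ottPos : List String :=
  ["brilliant","stunning","masterpiece","outstanding",
   "amazing","gripping","powerful","emotional"]

def ottNeg : List String :=
  ["boring","disappointing","weak","poor",
   "terrible","awful","bad","slow"]

def ott_sentiment (text : String) : Int :=
  let t := PySem.Str.lower text
  let p : Int := (ottPos.foldl (fun acc w => if PySem.Str.isIn w t then acc + 1 else acc) 0)
  let n : Int := (ottNeg.foldl (fun acc w => if PySem.Str.isIn w t then acc + 1 else acc) 0)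
  if p ≥ n then 1 else 0

-- ===== PORT B =====
-- the POS / NEG frozensets of Source B (literals are already duplicate-free)
def ottPosSet : PySem.Set String :=
  PySem.Set.ofList ["brilliant","stunning","masterpiece","outstanding",
                    "amazing","gripping","powerful","emotional"]

def ottNegSet : PySem.Set String :=
  PySem.Set.ofList ["boring","disappointing","weak","poor",
                    "terrible","awful","bad","slow"]

-- one inner 'for w in ws: if t.startswith(w, i): hits.add(w)' loop of Source B;
-- t.startswith(w, i) is exact as 'w.toList <+: (toList t).drop i' for 0 ≤ i ≤ len(t),
-- which covers every i produced by range(len(t)).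
def ottAddHits (tl : List Char) (i : Nat) (ws : List String) (hits : PySem.Set String) :
    PySem.Set String :=
  ws.foldl (fun h w => if PySem.Chars.startswith (tl.drop i) w.toList then PySem.Set.add h w else h) hits

def ott_sentiment_alt (text : String) : Int :=
  let t := PySem.Str.lower text
  let tl := t.toList
  let hits :=
    (List.range tl.length).foldl
      (fun h i => ottAddHits tl i ottNegSet (ottAddHits tl i ottPosSet h))
      PySem.Set.empty
  let p : Int := PySem.Set.len (PySem.Set.inter hits ottPosSet)
  if 2 * p ≥ (PySem.Set.len hits : Int) then 1 else 0

-- ===== PRECONDITION & SPEC =====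
def Spec_ott_sentiment (text : String) (out : Int) : Prop := out = ott_sentiment_alt text
instance (text : String) (out : Int) : Decidable (Spec_ott_sentiment text out) := by unfold Spec_ott_sentiment; infer_instance

-- ===== CLAIM =====
def Claim_equal_ott_sentiment : Prop := ∀ (text : String), Dom_ott_sentiment text → Spec_ott_sentiment text (ott_sentiment text)

-- ===== LEMMAS AND PROOFS =====

-- A's counting loop is the count of matched keywords
theorem ott_foldl_count (t : String) (ws : List String) (s : Int) :
    ws.foldl (fun acc w => if PySem.Str.isIn w t then acc + 1 else acc) s
      = s + ((ws.countP (fun w => PySem.Str.isIn w t) : Nat) : Int) := by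
  induction ws generalizing s with
  | nil => simp
  | cons w ws ih =>
    simp only [List.foldl_cons, List.countP_cons, ih]
    split_ifs <;> push_cast <;> ring

-- membership after one inner add-loop of B
theorem ottAddHits_mem (tl : List Char) (i : Nat) (ws : List String) (h : PySem.Set String)
    (x : String) :
    x ∈ ottAddHits tl i ws h ↔ x ∈ h ∨ (x ∈ ws ∧ PySem.Chars.startswith (tl.drop i) x.toList) := by
  unfold ottAddHits
  induction ws generalizing h with
  | nil => simp
  | cons w ws ih =>
    simp only [List.foldl_cons, List.mem_cons, ih]
    split_ifs with hw
    · simp only [PySem.Set.mem_add]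
      constructor
      · rintro (⟨hx | rfl⟩ | hx)
        · exact Or.inl hx
        · exact Or.inr ⟨Or.inl rfl, hw⟩
        · exact Or.inr ⟨Or.inr hx.1, hx.2⟩
      · rintro (hx | ⟨rfl | hx, hs⟩)
        · exact Or.inl (Or.inl hx)
        · exact Or.inl (Or.inr rfl)
        · exact Or.inr ⟨hx, hs⟩
    · constructor
      · rintro (hx | hx)
        · exact Or.inl hx
        · exact Or.inr ⟨Or.inr hx.1, hx.2⟩
      · rintro (hx | ⟨rfl | hx, hs⟩)
        · exact Or.inl hx
        · exact absurd hs hw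
        · exact Or.inr ⟨hx, hs⟩

theorem ottAddHits_nodup (tl : List Char) (i : Nat) (ws : List String) (h : PySem.Set String)
    (hn : h.Nodup) : (ottAddHits tl i ws h).Nodup := by
  unfold ottAddHits
  induction ws generalizing h with
  | nil => exact hn
  | cons w ws ih =>
    simp only [List.foldl_cons]
    split_ifs
    · exact ih _ (PySem.Set.nodup_add _ _ hn)
    · exact ih _ hn

-- membership in B's hits set after the outer loop over the first n positions
theorem ott_hits_mem (tl : List Char) (n : Nat) (x : String) :
    x ∈ (List.range n).foldl
          (fun h i => ottAddHits tl i ottNegSet (ottAddHits tl i ottPosSet h))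
          PySem.Set.empty
      ↔ ((x ∈ ottPosSet ∨ x ∈ ottNegSet) ∧
          ∃ i < n, PySem.Chars.startswith (tl.drop i) x.toList) := by
  induction n with
  | zero => simp [PySem.Set.empty]
  | succ n ih =>
    rw [List.range_succ, List.foldl_append]
    simp only [List.foldl_cons, List.foldl_nil, ottAddHits_mem, ih]
    constructor
    · rintro ((⟨hm, i, hi, hs⟩ | ⟨hp, hs⟩) | ⟨hn', hs⟩)
      · exact ⟨hm, i, Nat.lt_succ_of_lt hi, hs⟩
      · exact ⟨Or.inl hp, n, Nat.lt_succ_self n, hs⟩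
      · exact ⟨Or.inr hn', n, Nat.lt_succ_self n, hs⟩
    · rintro ⟨hm, i, hi, hs⟩
      rcases Nat.lt_succ_iff_lt_or_eq.mp hi with hi' | rfl
      · exact Or.inl (Or.inl ⟨hm, i, hi', hs⟩)
      · rcases hm with hp | hn'
        · exact Or.inl (Or.inr ⟨hp, hs⟩)
        · exact Or.inr ⟨hn', hs⟩

theorem ott_hits_nodup (tl : List Char) (n : Nat) :
    ((List.range n).foldl
        (fun h i => ottAddHits tl i ottNegSet (ottAddHits tl i ottPosSet h))
        PySem.Set.empty).Nodup := by
  induction n with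
  | zero => simp [PySem.Set.empty]
  | succ n ih =>
    rw [List.range_succ, List.foldl_append]
    simp only [List.foldl_cons, List.foldl_nil]
    exact ottAddHits_nodup _ _ _ _ (ottAddHits_nodup _ _ _ _ ih)

-- for a nonempty keyword, 'starts at some position < len' is exactly substring membership
theorem ott_exists_start_iff (t : String) (w : String) (hw : w.toList ≠ []) :
    (∃ i < t.toList.length, PySem.Chars.startswith (t.toList.drop i) w.toList)
      ↔ PySem.Str.isIn w t := by
  rw [show PySem.Str.isIn w t = PySem.Chars.isIn w.toList t.toList from rfl,
      ← PySem.Chars.exists_prefix_drop_iff_isIn]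
  constructor
  · rintro ⟨i, _, hs⟩
    exact ⟨i, (PySem.Chars.startswith_iff _ _).mp hs⟩
  · rintro ⟨j, hj⟩
    by_cases hjl : j < t.toList.length
    · exact ⟨j, hjl, (PySem.Chars.startswith_iff _ _).mpr hj⟩
    · exfalso
      rw [List.drop_eq_nil_of_le (Nat.le_of_not_lt hjl)] at hj
      exact hw (List.prefix_nil.mp hj)

-- every keyword is nonempty
theorem ott_keywords_ne_nil (w : String) (hw : w ∈ ottPosSet ∨ w ∈ ottNegSet) :
    w.toList ≠ [] := by
  rcases hw with h | h <;>
    · simp only [ottPosSet, ottNegSet, PySem.Set.mem_ofList, List.mem_cons,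
        List.not_mem_nil, or_false] at h
      rcases h with rfl | rfl | rfl | rfl | rfl | rfl | rfl | rfl <;> decide

-- a nodup list's length as a countP over the 16 keywords
theorem ott_hits_counts (t : String) :
    let tl := t.toList
    let hits := (List.range tl.length).foldl
        (fun h i => ottAddHits tl i ottNegSet (ottAddHits tl i ottPosSet h))
        PySem.Set.empty
    ∀ x, x ∈ hits ↔ ((x ∈ ottPos ∨ x ∈ ottNeg) ∧ PySem.Str.isIn x t) := by
  intro tl hits x
  rw [show hits = _ from rfl, ott_hits_mem]
  have hsets : (x ∈ ottPosSet ∨ x ∈ ottNegSet) ↔ (x ∈ ottPos ∨ x ∈ ottNeg) := by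
    simp [ottPosSet, ottNegSet, ottPos, ottNeg, PySem.Set.mem_ofList]
  constructor
  · rintro ⟨hm, hex⟩
    exact ⟨hsets.mp hm,
      (ott_exists_start_iff t x (ott_keywords_ne_nil x hm)).mp hex⟩
  · rintro ⟨hm, hin⟩
    have hm' := hsets.mpr hm
    exact ⟨hm', (ott_exists_start_iff t x (ott_keywords_ne_nil x hm')).mpr hin⟩

-- ===== VERDICT =====
theorem ott_sentiment_spec : Claim_equal_ott_sentiment := by
  intro text _
  unfold Spec_ott_sentiment
  simp only [ott_sentiment, ott_sentiment_alt]
  set t := PySem.Str.lower text with ht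
  set tl := t.toList with htl
  set hits := (List.range tl.length).foldl
      (fun h i => ottAddHits tl i ottNegSet (ottAddHits tl i ottPosSet h))
      PySem.Set.empty with hhits
  have hmem : ∀ x, x ∈ hits ↔ ((x ∈ ottPos ∨ x ∈ ottNeg) ∧ PySem.Str.isIn x t) :=
    ott_hits_counts t
  have hnd : hits.Nodup := ott_hits_nodup tl tl.length
  -- the reference matched-keyword list, in keyword order
  set matched := (ottPos ++ ottNeg).filter (fun w => PySem.Str.isIn w t) with hmat
  have hndm : matched.Nodup := by
    apply List.Nodup.filter
    decide
  have hperm : hits.Perm matched := by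
    apply List.perm_ext_iff_of_nodup hnd hndm |>.mpr
    intro x
    rw [hmem, hmat, List.mem_filter, List.mem_append]
  -- |hits| = p + n
  have hlen : hits.length = ottPos.countP (fun w => PySem.Str.isIn w t)
      + ottNeg.countP (fun w => PySem.Str.isIn w t) := by
    rw [hperm.length_eq, hmat, ← List.countP_eq_length_filter, List.countP_append]
  -- |hits ∩ POS| = p
  have hp : (PySem.Set.inter hits ottPosSet).length
      = ottPos.countP (fun w => PySem.Str.isIn w t) := by
    have hi : PySem.Set.inter hits ottPosSet = hits.filter (fun w => PySem.Set.contains ottPosSet w) := rfl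
    rw [hi, ← List.countP_eq_length_filter,
        hperm.countP_eq, hmat, List.countP_filter, List.countP_append]
    have hz : ottNeg.countP (fun w =>
        PySem.Set.contains ottPosSet w && PySem.Str.isIn w t) = 0 := by
      apply List.countP_eq_zero.mpr
      intro w hw h
      have h1 : PySem.Set.contains ottPosSet w = true := by
        rcases Bool.and_eq_true_iff.mp h with ⟨h1, _⟩; exact h1
      fin_cases hw <;> exact absurd h1 (by decide)
    have ho : ottPos.countP (fun w =>
        PySem.Set.contains ottPosSet w && PySem.Str.isIn w t)
        = ottPos.countP (fun w => PySem.Str.isIn w t) := by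
      apply List.countP_congr
      intro w hw
      have hc : PySem.Set.contains ottPosSet w = true := by
        fin_cases hw <;> decide
      rw [hc, Bool.true_and]
    rw [hz, ho]
    omega
  rw [ott_foldl_count, ott_foldl_count]
  have hlen' : (PySem.Set.len hits : Int)
      = (ottPos.countP (fun w => PySem.Str.isIn w t) : Int)
        + (ottNeg.countP (fun w => PySem.Str.isIn w t) : Int) := by
    unfold PySem.Set.len
    rw [hlen]; push_cast; ring
  have hp' : (PySem.Set.len (PySem.Set.inter hits ottPosSet) : Int)
      = (ottPos.countP (fun w => PySem.Str.isIn w t) : Int) := by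
    unfold PySem.Set.len
    rw [hp]
  rw [hlen', hp']
  split_ifs <;> omega
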